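-- pv_equiv track=rewrite | github.com/pypi-data/pypi-mirror-337 | packages/curia/curia-4.21.3.tar.gz/curia-4.21.3/src/curia/mock/api_server.py | match_call_pattern_to_method_name
-- ===== SOURCE A (Python) =====
-- from typing import Tuple, List, Dict, Callable, Union, Any
--
-- def match_call_pattern_to_method_name(
--         call_pattern: Tuple[str, str],
--         call_pattern_to_method_name: Dict[Tuple, str]) \
--         -> Tuple[str, dict]:
--     """
--     Matches a URL call pattern to a method name, e.g. (/models/some-id-here, GET) -> get_one_base_model_controller_model
--     :param call_pattern: Realized call pattern to match, e.g. (/models/some-id-here, GET)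
--     :param call_pattern_to_method_name: Dictionary of unrealized call patterns (e.g. /models/{id}) to method names
--     :return: Method name that matches the call pattern
--     """
--     url, call_request_method = call_pattern
--     call_pattern_components = url.split("/")[1:]  # remove leading slash
--     for pattern, method_name in call_pattern_to_method_name.items():
--         url_pattern, request_method = pattern
--         if request_method != call_request_method:
--             continue
--         url_pattern_components = url_pattern.split("/")[1:]  # remove leading slash
--         if len(url_pattern_components) != len(call_pattern_components):
--             continue
--         kwargs = {}
--         for pattern_component, call_pattern_component in zip(url_pattern_components, call_pattern_components):
--             if pattern_component.startswith("{") and pattern_component.endswith("}"):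
--                 kwargs[pattern_component[1:-1]] = call_pattern_component
--                 continue
--             if pattern_component != call_pattern_component:
--                 break
--         else:
--             return method_name, kwargs
--     raise ValueError(f"Could not match call pattern {call_pattern} to any method!")
-- ===== SOURCE B (Python) =====
-- def _compile(url_pattern):
--     return [
--         (True, comp[1:-1]) if comp.startswith("{") and comp.endswith("}") else (False, comp)
--         for comp in url_pattern.split("/")[1:]
--     ]
--
--
-- def match_call_pattern_to_method_name(call_pattern, call_pattern_to_method_name):
--     url, call_request_method = call_pattern
--     parts = url.split("/")[1:]
--     index = {}
--     for (url_pattern, request_method), method_name in call_pattern_to_method_name.items():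
--         compiled = _compile(url_pattern)
--         index.setdefault((request_method, len(compiled)), []).append((compiled, method_name))
--     for compiled, method_name in index.get((call_request_method, len(parts)), []):
--         if all(wild or token == part for (wild, token), part in zip(compiled, parts)):
--             kwargs = {}
--             for (wild, token), part in zip(compiled, parts):
--                 if wild:
--                     kwargs[token] = part
--             return method_name, kwargs
--     raise ValueError(f"Could not match call pattern {call_pattern} to any method!")
-- ===== Notes on version B (the rewrite author's own statement) =====
-- stated objective: alternative
-- what changed: B precompiles every route once into (wildcard?, token) component lists and groups them in a dictionary keyed by (method, component count), then scans only the candidate bucket for the call's key instead of re-splitting and re-checking method and length for every route on every lookup.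
import Mathlib
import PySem

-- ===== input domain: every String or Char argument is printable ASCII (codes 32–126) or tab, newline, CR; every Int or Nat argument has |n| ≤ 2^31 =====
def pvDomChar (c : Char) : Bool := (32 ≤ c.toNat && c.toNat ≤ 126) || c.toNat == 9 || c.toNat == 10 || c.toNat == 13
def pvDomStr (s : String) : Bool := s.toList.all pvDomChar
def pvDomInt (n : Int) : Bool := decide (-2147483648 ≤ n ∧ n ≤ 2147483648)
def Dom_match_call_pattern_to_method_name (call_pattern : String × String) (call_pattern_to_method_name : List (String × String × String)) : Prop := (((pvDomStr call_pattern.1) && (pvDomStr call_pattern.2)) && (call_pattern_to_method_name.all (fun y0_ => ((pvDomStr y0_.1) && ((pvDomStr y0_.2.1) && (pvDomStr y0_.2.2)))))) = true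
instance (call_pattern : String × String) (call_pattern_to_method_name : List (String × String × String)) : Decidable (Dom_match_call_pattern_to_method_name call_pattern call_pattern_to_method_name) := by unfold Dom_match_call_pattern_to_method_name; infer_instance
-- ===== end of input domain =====

-- B precompiles each route into (wildcard?, token) components and groups routes in a dict
-- keyed by (method, component count), scanning only the matching bucket (alternative decomposition,
-- same results); Pre_ excludes exactly the inputs where A raises ValueError (no route matches) —
-- B raises the same ValueError there.


-- ===== PORT A =====
-- url.split("/")[1:]
def pvSplitComponents (url : String) : List String :=
  ((PySem.Str.split? url "/").getD []).drop 1

-- the inner `for … zip … / break / else` of A: some kwargs if the loop completes, none on break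
def pvAInner : List (String × String) → PySem.Dict String String → Option (PySem.Dict String String)
  | [], kwargs => some kwargs
  | (p, c) :: rest, kwargs =>
    if PySem.Str.startswith p "{" && PySem.Str.endswith p "}" then
      pvAInner rest (kwargs.insert (PySem.Str.slice p (some 1) (some (-1))) c)
    else if p ≠ c then none
    else pvAInner rest kwargs

-- the outer `for pattern, method_name in … .items()` of A
def pvALoop (ccs : List String) (m : String) :
    List (String × String × String) → Option (String × PySem.Dict String String)
  | [] => none
  | (url_pattern, request_method, method_name) :: rest =>
    if request_method ≠ m then pvALoop ccs m rest
    else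
      let ups := pvSplitComponents url_pattern
      if ups.length ≠ ccs.length then pvALoop ccs m rest
      else
        match pvAInner (ups.zip ccs) PySem.Dict.empty with
        | some kwargs => some (method_name, kwargs)
        | none => pvALoop ccs m rest

def match_call_pattern_to_method_name (call_pattern : String × String) (call_pattern_to_method_name : List (String × String × String)) : String × (List (String × String)) :=
  match pvALoop (pvSplitComponents call_pattern.1) call_pattern.2 call_pattern_to_method_name with
  | some (method_name, kwargs) => (method_name, kwargs.items)
  | none => ("", [])  -- A raises ValueError here; excluded by Pre_

-- ===== PORT B =====
-- one component of _compile's comprehension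
def pvCompileComp (comp : String) : Bool × String :=
  if PySem.Str.startswith comp "{" && PySem.Str.endswith comp "}" then
    (true, PySem.Str.slice comp (some 1) (some (-1)))
  else (false, comp)

-- _compile(url_pattern)
def pvCompile (url_pattern : String) : List (Bool × String) :=
  (((PySem.Str.split? url_pattern "/").getD []).drop 1).map pvCompileComp

-- the index-building loop: setdefault(key, []).append(x) is Dict.modify key [] (· ++ [x])
def pvBIndex (call_pattern_to_method_name : List (String × String × String)) :
    PySem.Dict (String × Nat) (List (List (Bool × String) × String)) :=
  call_pattern_to_method_name.foldl
    (fun index r =>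
      let compiled := pvCompile r.1
      index.modify (r.2.1, compiled.length) [] (· ++ [(compiled, r.2.2)]))
    PySem.Dict.empty

-- the bucket scan
def pvBScan (parts : List String) :
    List (List (Bool × String) × String) → Option (String × PySem.Dict String String)
  | [] => none
  | (compiled, method_name) :: rest =>
    if (compiled.zip parts).all (fun pc => pc.1.1 || pc.1.2 == pc.2) then
      some (method_name,
        (compiled.zip parts).foldl
          (fun kwargs pc => if pc.1.1 then kwargs.insert pc.1.2 pc.2 else kwargs)
          PySem.Dict.empty)
    else pvBScan parts rest

def match_call_pattern_to_method_name_alt (call_pattern : String × String) (call_pattern_to_method_name : List (String × String × String)) : String × (List (String × String)) :=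
  let parts := ((PySem.Str.split? call_pattern.1 "/").getD []).drop 1
  match pvBScan parts ((pvBIndex call_pattern_to_method_name).getD (call_pattern.2, parts.length) []) with
  | some (method_name, kwargs) => (method_name, kwargs.items)
  | none => ("", [])  -- B raises the same ValueError here; excluded by Pre_

-- ===== PRECONDITION & SPEC =====
-- Pre_ excludes exactly the inputs on which A raises ValueError (no route matches the call pattern);
-- B raises the same ValueError there.
def Pre_match_call_pattern_to_method_name (call_pattern : String × String) (call_pattern_to_method_name : List (String × String × String)) : Prop :=
  ∃ r ∈ call_pattern_to_method_name,
    r.2.1 = call_pattern.2 ∧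
    (pvSplitComponents r.1).length = (pvSplitComponents call_pattern.1).length ∧
    ∀ pc ∈ (pvSplitComponents r.1).zip (pvSplitComponents call_pattern.1),
      (PySem.Str.startswith pc.1 "{" && PySem.Str.endswith pc.1 "}") = true ∨ pc.1 = pc.2
instance (call_pattern : String × String) (call_pattern_to_method_name : List (String × String × String)) : Decidable (Pre_match_call_pattern_to_method_name call_pattern call_pattern_to_method_name) := by unfold Pre_match_call_pattern_to_method_name; infer_instance

def pvWitness_match_call_pattern_to_method_name : (String × String) × (List (String × String × String)) :=
  (("/models/some-id", "GET"), [("/models/{id}", "GET", "get_one_model")])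

def Spec_match_call_pattern_to_method_name (call_pattern : String × String) (call_pattern_to_method_name : List (String × String × String)) (out : String × (List (String × String))) : Prop := out = match_call_pattern_to_method_name_alt call_pattern call_pattern_to_method_name
instance (call_pattern : String × String) (call_pattern_to_method_name : List (String × String × String)) (out : String × (List (String × String))) : Decidable (Spec_match_call_pattern_to_method_name call_pattern call_pattern_to_method_name out) := by unfold Spec_match_call_pattern_to_method_name; infer_instance

-- ===== CLAIM (what is proved, stated in full; the proofs are below) =====
def Claim_equal_match_call_pattern_to_method_name : Prop := ∀ (call_pattern : String × String) (call_pattern_to_method_name : List (String × String × String)), Dom_match_call_pattern_to_method_name call_pattern call_pattern_to_method_name → Pre_match_call_pattern_to_method_name call_pattern call_pattern_to_method_name → Spec_match_call_pattern_to_method_name call_pattern call_pattern_to_method_name (match_call_pattern_to_method_name call_pattern call_pattern_to_method_name)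

-- ===== LEMMAS AND PROOFS =====

theorem pvCompile_eq (u : String) : pvCompile u = (pvSplitComponents u).map pvCompileComp := rfl

theorem pv_idx (l : List (String × String × String)) (key : String × Nat) :
    (pvBIndex l).getD key []
      = ((l.map (fun r => ((r.2.1, (pvCompile r.1).length), (pvCompile r.1, r.2.2)))).filter
          (fun p => p.1 == key)).map (fun x => x.2) := by
  have h : pvBIndex l
      = (l.map (fun r => ((r.2.1, (pvCompile r.1).length), (pvCompile r.1, r.2.2)))).foldl
          (fun d (p : (String × Nat) × (List (Bool × String) × String)) =>
            d.modify p.1 [] (· ++ [p.2])) PySem.Dict.empty := by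
    rw [List.foldl_map]
    rfl
  rw [h, PySem.Dict.getD_foldl_modify_append]
  simp

theorem pv_inner (zl : List (String × String)) (kw : PySem.Dict String String) :
    pvAInner zl kw
      = if zl.all (fun pc => (PySem.Str.startswith pc.1 "{" && PySem.Str.endswith pc.1 "}") || pc.1 == pc.2)
        then some (zl.foldl
          (fun kwargs pc =>
            if PySem.Str.startswith pc.1 "{" && PySem.Str.endswith pc.1 "}" then
              kwargs.insert (PySem.Str.slice pc.1 (some 1) (some (-1))) pc.2
            else kwargs) kw)
        else none := by
  induction zl generalizing kw with
  | nil => simp [pvAInner]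
  | cons pc rest ih =>
    obtain ⟨p, c⟩ := pc
    simp only [pvAInner, List.all_cons, List.foldl_cons]
    by_cases hw : (PySem.Str.startswith p "{" && PySem.Str.endswith p "}") = true
    · rw [if_pos hw, ih, hw]
      simp only [Bool.true_or, Bool.true_and, if_true]
    · rw [if_neg hw]
      rw [Bool.not_eq_true] at hw
      by_cases hpc : p = c
      · have hbc : (p == c) = true := by simp [hpc]
        rw [if_neg (by simpa using hpc), ih, hw]
        simp only [Bool.false_or, hbc, Bool.true_and, Bool.false_eq_true, if_false]
      · have hbc : (p == c) = false := by simp [hpc]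
        rw [if_pos hpc, hw]
        simp only [Bool.false_or, hbc, Bool.false_and, Bool.false_eq_true, if_false]

theorem pv_check (ups parts : List String) :
    ((ups.map pvCompileComp).zip parts).all (fun pc => pc.1.1 || pc.1.2 == pc.2)
      = (ups.zip parts).all (fun pc =>
          (PySem.Str.startswith pc.1 "{" && PySem.Str.endswith pc.1 "}") || pc.1 == pc.2) := by
  rw [List.zip_map_left, List.all_map]
  congr 1
  funext pc
  unfold pvCompileComp
  by_cases h1 : PySem.Chars.startswith pc.1.toList "{".toList = true <;>
    by_cases h2 : PySem.Chars.endswith pc.1.toList "}".toList = true <;>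
    simp_all

theorem pv_kwargs (ups parts : List String) (kw : PySem.Dict String String) :
    ((ups.map pvCompileComp).zip parts).foldl
        (fun kwargs pc => if pc.1.1 then kwargs.insert pc.1.2 pc.2 else kwargs) kw
      = (ups.zip parts).foldl
        (fun kwargs pc =>
          if PySem.Str.startswith pc.1 "{" && PySem.Str.endswith pc.1 "}" then
            kwargs.insert (PySem.Str.slice pc.1 (some 1) (some (-1))) pc.2
          else kwargs) kw := by
  rw [List.zip_map_left, List.foldl_map]
  congr 1
  funext kwargs pc
  unfold pvCompileComp
  by_cases h1 : PySem.Chars.startswith pc.1.toList "{".toList = true <;>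
    by_cases h2 : PySem.Chars.endswith pc.1.toList "}".toList = true <;>
    simp_all

theorem pv_main (parts : List String) (m : String) (l : List (String × String × String)) :
    pvBScan parts ((pvBIndex l).getD (m, parts.length) []) = pvALoop parts m l := by
  induction l with
  | nil => simp [pv_idx, pvBScan, pvALoop]
  | cons r rest ih =>
    obtain ⟨up, rm, name⟩ := r
    rw [pv_idx]
    by_cases hm : rm = m
    · subst hm
      by_cases hl : (pvSplitComponents up).length = parts.length
      · have hkey : (((rm, (pvCompile up).length) : String × Nat) == (rm, parts.length)) = true := by
          simp [pvCompile_eq, hl]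
        simp only [List.map_cons, List.filter_cons, hkey, if_true]
        rw [← pv_idx]
        rw [show pvALoop parts rm ((up, rm, name) :: rest)
              = (match pvAInner ((pvSplitComponents up).zip parts) PySem.Dict.empty with
                 | some kwargs => some (name, kwargs)
                 | none => pvALoop parts rm rest) from by
          simp only [pvALoop]
          rw [if_neg (fun h => h rfl), if_neg (by omega)]]
        simp only [pvBScan]
        rw [ih, pvCompile_eq, pv_check, pv_kwargs, pv_inner]
        by_cases hall : (((pvSplitComponents up).zip parts).all (fun pc =>
            (PySem.Str.startswith pc.1 "{" && PySem.Str.endswith pc.1 "}") || pc.1 == pc.2)) = true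
        · rw [if_pos hall]
          rw [if_pos hall]
        · rw [if_neg hall]
          rw [if_neg hall]
      · have hkey : (((rm, (pvCompile up).length) : String × Nat) == (rm, parts.length)) = false := by
          simp [pvCompile_eq, hl]
        simp only [List.map_cons, List.filter_cons, hkey, Bool.false_eq_true, if_false]
        rw [← pv_idx, ih]
        simp only [pvALoop]
        rw [if_neg (fun h => h rfl), if_pos (by simpa using hl)]
    · have hkey : (((rm, (pvCompile up).length) : String × Nat) == (m, parts.length)) = false := by
        simp [hm]
      simp only [List.map_cons, List.filter_cons, hkey, Bool.false_eq_true, if_false]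
      rw [← pv_idx, ih]
      simp only [pvALoop]
      rw [if_pos hm]

-- ===== VERDICT (by name: the statement is the Claim_ definition above) =====
theorem match_call_pattern_to_method_name_spec : Claim_equal_match_call_pattern_to_method_name := by
  intro cp l _ _
  unfold Spec_match_call_pattern_to_method_name
  unfold match_call_pattern_to_method_name match_call_pattern_to_method_name_alt
  show _ = (match pvBScan (pvSplitComponents cp.1) ((pvBIndex l).getD (cp.2, (pvSplitComponents cp.1).length) []) with
    | some (method_name, kwargs) => (method_name, kwargs.items)
    | none => ("", []))
  rw [pv_main]
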